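-- pv_equiv track=rewrite | github.com/Xinglab/scCirRL-seq | nanohunter/collect_candidate_bc.py | get_cumulative_cnt
-- ===== SOURCE A (Python) =====
-- def get_cumulative_cnt(cnt, max_n=10000, min_cnt=2):
--     cumu_cnt = []
--     cumu = 0
--     n = 0
--     for c in cnt:
--         if c < min_cnt:
--             break
--         if n >= max_n:
--             break
--         cumu_cnt.append(c+cumu)
--         n += 1
--         cumu += c
--     return cumu_cnt
-- ===== SOURCE B (Python) =====
-- def get_cumulative_cnt(cnt, max_n=10000, min_cnt=2):
--     # Phase 1: find the length k of the valid prefix (capped at max_n,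
--     # stopping at the first count below min_cnt).
--     k = 0
--     while k < len(cnt) and k < max_n and cnt[k] >= min_cnt:
--         k += 1
--     # Phase 2: inclusive prefix sums of that prefix.
--     total = 0
--     out = []
--     for x in cnt[:k]:
--         total += x
--         out.append(total)
--     return out
-- ===== Notes on version B (the rewrite author's own statement) =====
-- stated objective: simpler
-- what changed: Replaces A's single fused loop (two break conditions interleaved with manual cumulative bookkeeping cumu/n) with a two-phase truncate-then-scan decomposition: first find the valid prefix length k, then take the plain inclusive prefix sums of cnt[:k].
import Mathlib
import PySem

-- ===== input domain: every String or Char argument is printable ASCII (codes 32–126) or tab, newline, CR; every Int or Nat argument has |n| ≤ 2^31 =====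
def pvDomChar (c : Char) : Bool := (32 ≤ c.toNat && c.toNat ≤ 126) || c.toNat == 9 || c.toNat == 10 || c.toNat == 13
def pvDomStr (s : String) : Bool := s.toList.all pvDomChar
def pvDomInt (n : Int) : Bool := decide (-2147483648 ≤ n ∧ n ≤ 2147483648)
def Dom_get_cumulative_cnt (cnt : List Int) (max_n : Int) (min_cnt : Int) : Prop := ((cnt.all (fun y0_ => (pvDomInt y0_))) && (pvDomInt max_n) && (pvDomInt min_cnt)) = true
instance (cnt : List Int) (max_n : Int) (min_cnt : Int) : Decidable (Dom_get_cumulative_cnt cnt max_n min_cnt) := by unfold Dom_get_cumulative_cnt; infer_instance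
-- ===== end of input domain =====

-- B replaces A's fused single loop (two breaks + cumu/n bookkeeping) with a simpler
-- truncate-then-scan decomposition: find the valid prefix length, then prefix-sum it.

-- ===== PORT A =====
-- A's for-loop over cnt with state (cumu, n, cumu_cnt); the two `break`s are the
-- two early returns, branches in A's order.
def aLoop (min_cnt max_n : Int) : List Int → Int → Int → List Int → List Int
  | [], _, _, cumu_cnt => cumu_cnt
  | c :: rest, cumu, n, cumu_cnt =>
    if c < min_cnt then cumu_cnt
    else if max_n ≤ n then cumu_cnt
    else aLoop min_cnt max_n rest (cumu + c) (n + 1) (cumu_cnt ++ [c + cumu])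

def get_cumulative_cnt (cnt : List Int) (max_n : Int) (min_cnt : Int) : List Int :=
  aLoop min_cnt max_n cnt 0 0 []

-- ===== PORT B =====
-- Phase 1: the while-loop `while k < len(cnt) and k < max_n and cnt[k] >= min_cnt: k += 1`,
-- walking the list structurally with the counter k.
def bFindK (max_n min_cnt : Int) : List Int → Int → Int
  | [], k => k
  | c :: rest, k => if k < max_n ∧ min_cnt ≤ c then bFindK max_n min_cnt rest (k + 1) else k

-- Phase 2: `total = 0; out = []; for x in cnt[:k]: total += x; out.append(total)`.
-- k ≥ 0 by construction, so List.take k.toNat is exactly the slice cnt[:k].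
def get_cumulative_cnt_alt (cnt : List Int) (max_n : Int) (min_cnt : Int) : List Int :=
  let k := bFindK max_n min_cnt cnt 0
  ((cnt.take k.toNat).foldl (fun (st : Int × List Int) x => (st.1 + x, st.2 ++ [st.1 + x])) (0, [])).2

-- ===== PRECONDITION & SPEC =====
def Spec_get_cumulative_cnt (cnt : List Int) (max_n : Int) (min_cnt : Int) (out : List Int) : Prop := out = get_cumulative_cnt_alt cnt max_n min_cnt
instance (cnt : List Int) (max_n : Int) (min_cnt : Int) (out : List Int) : Decidable (Spec_get_cumulative_cnt cnt max_n min_cnt out) := by unfold Spec_get_cumulative_cnt; infer_instance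

-- ===== CLAIM (what is proved, stated in full; the proofs are below) =====
def Claim_equal_get_cumulative_cnt : Prop := ∀ (cnt : List Int) (max_n : Int) (min_cnt : Int), Dom_get_cumulative_cnt cnt max_n min_cnt → Spec_get_cumulative_cnt cnt max_n min_cnt (get_cumulative_cnt cnt max_n min_cnt)

-- ===== LEMMAS AND PROOFS =====

-- cons-shaped inclusive prefix scan, the proof-side normal form of B's phase 2
def sscan : List Int → Int → List Int
  | [], _ => []
  | x :: rest, t => (t + x) :: sscan rest (t + x)

theorem bFindK_ge (max_n min_cnt : Int) : ∀ (xs : List Int) (k : Int), k ≤ bFindK max_n min_cnt xs k := by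
  intro xs
  induction xs with
  | nil => intro k; simp [bFindK]
  | cons c rest ih =>
    intro k
    simp only [bFindK]
    split
    · exact le_trans (by omega) (ih (k + 1))
    · exact le_refl k

theorem foldl_scan_eq_sscan : ∀ (xs : List Int) (t : Int) (acc : List Int),
    (xs.foldl (fun (st : Int × List Int) x => (st.1 + x, st.2 ++ [st.1 + x])) (t, acc)).2
      = acc ++ sscan xs t := by
  intro xs
  induction xs with
  | nil => intro t acc; simp [sscan]
  | cons x rest ih =>
    intro t acc
    simp only [List.foldl, sscan]
    rw [ih (t + x) (acc ++ [t + x])]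
    simp

theorem aLoop_eq_sscan (min_cnt max_n : Int) : ∀ (xs : List Int) (n cumu : Int) (acc : List Int),
    aLoop min_cnt max_n xs cumu n acc
      = acc ++ sscan (xs.take (bFindK max_n min_cnt xs n - n).toNat) cumu := by
  intro xs
  induction xs with
  | nil => intro n cumu acc; simp [aLoop, bFindK, sscan]
  | cons c rest ih =>
    intro n cumu acc
    by_cases h1 : c < min_cnt
    · have hb : ¬ (n < max_n ∧ min_cnt ≤ c) := by omega
      simp [aLoop, bFindK, h1, hb, sscan]
    · by_cases h2 : max_n ≤ n
      · have hb : ¬ (n < max_n ∧ min_cnt ≤ c) := by omega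
        simp [aLoop, bFindK, h1, h2, hb, sscan]
      · have hb : n < max_n ∧ min_cnt ≤ c := by omega
        have hk : bFindK max_n min_cnt (c :: rest) n = bFindK max_n min_cnt rest (n + 1) := by
          simp [bFindK, hb]
        have hge : n + 1 ≤ bFindK max_n min_cnt rest (n + 1) := bFindK_ge _ _ _ _
        have htn : (bFindK max_n min_cnt rest (n + 1) - n).toNat
            = (bFindK max_n min_cnt rest (n + 1) - (n + 1)).toNat + 1 := by omega
        rw [hk, htn]
        simp only [aLoop, if_neg (by omega : ¬ c < min_cnt), if_neg h2, List.take_succ_cons, sscan]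
        rw [ih (n + 1) (cumu + c) (acc ++ [c + cumu])]
        have : c + cumu = cumu + c := by ring
        simp [this]

-- ===== VERDICT (by name: the statement is the Claim_ definition above) =====
theorem get_cumulative_cnt_spec : Claim_equal_get_cumulative_cnt := by
  intro cnt max_n min_cnt _
  unfold Spec_get_cumulative_cnt get_cumulative_cnt get_cumulative_cnt_alt
  rw [aLoop_eq_sscan, foldl_scan_eq_sscan]
  simp
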